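-- pv_equiv track=rewrite | github.com/deeagalbin/congenial-bassoon | modularity.py | Kronecker_function
-- ===== SOURCE A (Python) =====
-- def Kronecker_function(comunitati, node_i, node_j):
--     community_i = None
--     community_j = None
--     ok = 0
--     for k in range(len(comunitati)):
--         if node_i in comunitati[k]:
--             community_i = k
--         if node_j in comunitati[k]:
--             community_j = k
--     if community_i == community_j:
--         ok = 1
--     return ok
-- ===== SOURCE B (Python) =====
-- def Kronecker_function(comunitati, node_i, node_j):
--     # Scan communities from last to first: A keeps the LAST community index
--     # containing each node, so the first community (in reverse) containing
--     # either node decides the answer; if neither node occurs anywhere, both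
--     # "last indices" are None and they are trivially in the same community.
--     for comm in reversed(comunitati):
--         ci = node_i in comm
--         cj = node_j in comm
--         if ci or cj:
--             return 1 if (ci and cj) else 0
--     return 1
-- ===== Notes on version B (the rewrite author's own statement) =====
-- stated objective: alternative
-- what changed: Replaces A's full forward scan that tracks the last community index of each node with a reverse scan that stops at the first community containing either node and decides there (both present -> 1, one present -> 0; neither anywhere -> 1), eliminating index bookkeeping and adding early termination.
import Mathlib
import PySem

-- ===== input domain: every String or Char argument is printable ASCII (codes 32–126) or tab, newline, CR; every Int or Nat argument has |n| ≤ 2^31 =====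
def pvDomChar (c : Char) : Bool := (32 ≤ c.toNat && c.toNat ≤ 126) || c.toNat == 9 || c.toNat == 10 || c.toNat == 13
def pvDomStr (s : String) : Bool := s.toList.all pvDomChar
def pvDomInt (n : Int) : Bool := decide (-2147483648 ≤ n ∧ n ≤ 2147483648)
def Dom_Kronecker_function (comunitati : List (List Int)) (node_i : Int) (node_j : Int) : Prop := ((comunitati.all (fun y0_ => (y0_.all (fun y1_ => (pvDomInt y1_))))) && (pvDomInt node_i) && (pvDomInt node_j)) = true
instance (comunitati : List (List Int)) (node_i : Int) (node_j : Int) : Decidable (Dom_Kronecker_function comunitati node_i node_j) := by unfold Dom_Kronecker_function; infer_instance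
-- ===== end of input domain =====

-- B scans the communities in reverse and stops at the first one containing either node
-- (both present -> 1, one -> 0; neither anywhere -> 1), instead of A's full forward scan
-- tracking the last community index of each node.

-- ===== PORT A =====
def Kronecker_function (comunitati : List (List Int)) (node_i : Int) (node_j : Int) : Int :=
  -- community_i = None; community_j = None; for k in range(len(comunitati)): …
  let res := (PySem.List.pyRange 0 comunitati.length 1).foldl
    (fun (s : Option Int × Option Int) k =>
      ((if node_i ∈ PySem.List.pyGetD comunitati k [] then some k else s.1),
       (if node_j ∈ PySem.List.pyGetD comunitati k [] then some k else s.2)))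
    (none, none)
  if res.1 = res.2 then 1 else 0

-- ===== PORT B =====
-- the 'for comm in reversed(comunitati): … return …' loop with early exit
def pvRevScan (node_i node_j : Int) : List (List Int) → Int
  | [] => 1
  | comm :: rest =>
    let ci := node_i ∈ comm
    let cj := node_j ∈ comm
    if ci ∨ cj then (if ci ∧ cj then 1 else 0) else pvRevScan node_i node_j rest

def Kronecker_function_alt (comunitati : List (List Int)) (node_i : Int) (node_j : Int) : Int :=
  pvRevScan node_i node_j comunitati.reverse

-- ===== PRECONDITION & SPEC =====
def Spec_Kronecker_function (comunitati : List (List Int)) (node_i : Int) (node_j : Int) (out : Int) : Prop := out = Kronecker_function_alt comunitati node_i node_j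
instance (comunitati : List (List Int)) (node_i : Int) (node_j : Int) (out : Int) : Decidable (Spec_Kronecker_function comunitati node_i node_j out) := by unfold Spec_Kronecker_function; infer_instance

-- ===== CLAIM (what is proved, stated in full; the proofs are below) =====
def Claim_equal_Kronecker_function : Prop := ∀ (comunitati : List (List Int)) (node_i : Int) (node_j : Int), Dom_Kronecker_function comunitati node_i node_j → Spec_Kronecker_function comunitati node_i node_j (Kronecker_function comunitati node_i node_j)

-- ===== LEMMAS AND PROOFS =====

-- the last-index scan A computes, over (index, community) pairs
def pvLastIdx (n : Int) (L : List (Int × List Int)) (acc : Option Int) : Option Int :=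
  L.foldl (fun a kc => if n ∈ kc.2 then some kc.1 else a) acc

theorem pvLastIdx_append (n : Int) (L M : List (Int × List Int)) (a : Option Int) :
    pvLastIdx n (L ++ M) a = pvLastIdx n M (pvLastIdx n L a) := by
  simp [pvLastIdx, List.foldl_append]

-- the result is the accumulator or the index of some listed pair
theorem pvLastIdx_cases (n : Int) (L : List (Int × List Int)) (a : Option Int) :
    pvLastIdx n L a = a ∨ ∃ kc ∈ L, pvLastIdx n L a = some kc.1 := by
  induction L generalizing a with
  | nil => exact Or.inl rfl
  | cons kc t ih =>
    simp only [pvLastIdx, List.foldl_cons] at *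
    by_cases h : n ∈ kc.2
    · simp only [h, if_pos] at *
      rcases ih (some kc.1) with h' | ⟨kc', hm, h'⟩
      · exact Or.inr ⟨kc, by simp, h'⟩
      · exact Or.inr ⟨kc', by simp [hm], h'⟩
    · simp only [h, if_neg, not_false_iff] at *
      rcases ih a with h' | ⟨kc', hm, h'⟩
      · exact Or.inl h'
      · exact Or.inr ⟨kc', by simp [hm], h'⟩

-- any index produced from 'enumerate L s' starting at accumulator none is < s + L.length
theorem pvLastIdx_enum_lt (n : Int) (L : List (List Int)) (s k : Int)
    (h : pvLastIdx n (PySem.List.enumerate L s) none = some k) : k < s + L.length := by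
  rcases pvLastIdx_cases n (PySem.List.enumerate L s) none with h' | ⟨kc, hm, h'⟩
  · rw [h'] at h; exact absurd h (by simp)
  · rw [h'] at h
    obtain ⟨m, hm', rfl⟩ := (PySem.List.mem_enumerate_iff _ _ _).1 hm
    have : k = s + m := by simpa using h.symm
    omega

-- A's paired fold splits into two independent last-index scans
theorem pv_pair_fold (L : List (Int × List Int)) (i j : Int) (a b : Option Int) :
    (L.foldl (fun (s : Option Int × Option Int) kc =>
        ((if i ∈ kc.2 then some kc.1 else s.1),
         (if j ∈ kc.2 then some kc.1 else s.2))) (a, b))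
      = (pvLastIdx i L a, pvLastIdx j L b) := by
  induction L generalizing a b with
  | nil => rfl
  | cons kc t ih => simp [pvLastIdx, List.foldl_cons, ih]

-- main bridge: comparing the two last indices over 'enumerate cs s' equals B's reverse scan
theorem pv_main (i j : Int) (cs : List (List Int)) (s : Int) :
    (if pvLastIdx i (PySem.List.enumerate cs s) none
        = pvLastIdx j (PySem.List.enumerate cs s) none then (1 : Int) else 0)
      = pvRevScan i j cs.reverse := by
  induction cs using List.reverseRecOn with
  | nil => simp [PySem.List.enumerate_nil, pvLastIdx, pvRevScan]
  | append_singleton L c ih =>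
    rw [List.reverse_append]
    simp only [List.reverse_cons, List.reverse_nil, List.nil_append, List.singleton_append]
    rw [PySem.List.enumerate_append]
    simp only [PySem.List.enumerate_cons, PySem.List.enumerate_nil]
    simp only [pvLastIdx_append]
    by_cases hi : i ∈ c <;> by_cases hj : j ∈ c
    · simp [pvRevScan, pvLastIdx, hi, hj]
    · have hj' : pvLastIdx j (PySem.List.enumerate L s) none ≠ some (s + (L.length : Int)) := by
        intro h
        have := pvLastIdx_enum_lt j L s _ h
        omega
      simp only [pvLastIdx] at hj' ⊢
      simp [pvRevScan, hi, hj, Ne.symm hj']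
    · have hi' : pvLastIdx i (PySem.List.enumerate L s) none ≠ some (s + (L.length : Int)) := by
        intro h
        have := pvLastIdx_enum_lt i L s _ h
        omega
      simp only [pvLastIdx] at hi' ⊢
      simp [pvRevScan, hi, hj, hi']
    · simpa [pvRevScan, pvLastIdx, hi, hj] using ih

-- ===== VERDICT (by name: the statement is the Claim_ definition above) =====
theorem Kronecker_function_spec : Claim_equal_Kronecker_function := by
  intro cs i j _
  show _ = _
  unfold Kronecker_function Kronecker_function_alt
  have h := pv_pair_fold ((PySem.List.pyRange 0 cs.length 1).map
      (fun k => (k, PySem.List.pyGetD cs k []))) i j none none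
  rw [List.foldl_map] at h
  have hm := pv_main i j cs 0
  rw [PySem.List.enumerate_eq_map_pyRange cs ([] : List Int)] at hm
  simpa [h] using hm
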